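-- pv_equiv track=rewrite | github.com/centervil/my-apps | apps/security-news-agent/src/security_news_agent/__main__.py | _insert_separators
-- ===== SOURCE A (Python) =====
-- def _insert_separators(md: str) -> str:
--     out = []
--     in_code = False
--     fence = None
--     prev = ""
--     def need_sep(prev_line: str) -> bool:
--         pl = prev_line.strip()
--         return pl != "---"
--     for line in md.splitlines():
--         if line.startswith("```") or line.startswith("~~~"):
--             if not in_code:
--                 in_code, fence = True, line[:3]
--             else:
--                 if fence and line.startswith(fence):
--                     in_code, fence = False, None
--             out.append(line)
--             prev = line
--             continue
--         if not in_code and line.startswith("## "):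
--             if need_sep(prev):
--                 out.append("---")
--             out.append(line)
--         else:
--             out.append(line)
--         prev = line
--     return "\n".join(out).strip() + "\n"
-- ===== SOURCE B (Python) =====
-- def _insert_separators(md: str) -> str:
--     lines = md.splitlines()
--     # pass 1: fence state at the entry of each line (None = outside code, else the open fence)
--     states = []
--     st = None
--     for line in lines:
--         states.append(st)
--         if line.startswith(("```", "~~~")):
--             if st is None:
--                 st = line[:3]
--             elif line.startswith(st):
--                 st = None
--     # pass 2: emit, pairing each line with its entry state and its predecessor
--     prevs = [""] + lines[:-1]
--     pieces = []
--     for line, (st, prev) in zip(lines, zip(states, prevs)):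
--         if st is None and line.startswith("## ") and prev.strip() != "---":
--             pieces.append("---")
--         pieces.append(line)
--     return "\n".join(pieces).strip() + "\n"
-- ===== Notes on version B (the rewrite author's own statement) =====
-- stated objective: alternative
-- what changed: A's single stateful loop (mutable out/in_code/fence/prev) is replaced by two passes: a first pass computes the list of fence states at the entry of each line, a second pass zips lines with their entry state and predecessor line and emits separators positionally.
import Mathlib
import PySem

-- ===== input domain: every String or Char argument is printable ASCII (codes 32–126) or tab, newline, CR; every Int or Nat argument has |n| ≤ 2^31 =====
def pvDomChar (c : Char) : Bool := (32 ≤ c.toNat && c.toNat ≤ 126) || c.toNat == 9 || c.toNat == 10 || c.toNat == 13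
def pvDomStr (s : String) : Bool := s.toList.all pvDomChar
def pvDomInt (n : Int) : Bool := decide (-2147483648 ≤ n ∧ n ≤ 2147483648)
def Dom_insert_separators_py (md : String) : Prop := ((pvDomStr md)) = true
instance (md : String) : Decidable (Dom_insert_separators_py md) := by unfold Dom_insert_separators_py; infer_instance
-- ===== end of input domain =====

-- B separates A's single stateful loop into two passes (fence-state list, then emission over zipped lines): alternative decomposition, same cost.


-- ===== PORT A =====
-- A's nested helper need_sep
def pvNeedSep (prev_line : String) : Bool :=
  PySem.Str.strip prev_line != "---"

-- A's loop body, state = (out, in_code, fence, prev)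
def pvStepA (s : List String × Bool × Option String × String) (line : String) :
    List String × Bool × Option String × String :=
  let (out, in_code, fence, prev) := s
  if PySem.Str.startswith line "```" || PySem.Str.startswith line "~~~" then
    if !in_code then (out ++ [line], true, some (PySem.Str.slice line none (some 3)), line)
    else
      match fence with
      | some f =>
          if f != "" && PySem.Str.startswith line f then (out ++ [line], false, none, line)
          else (out ++ [line], in_code, some f, line)
      | none => (out ++ [line], in_code, none, line)
  else if !in_code && PySem.Str.startswith line "## " then
    if pvNeedSep prev then ((out ++ ["---"]) ++ [line], in_code, fence, line)
    else (out ++ [line], in_code, fence, line)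
  else (out ++ [line], in_code, fence, line)

def insert_separators_py (md : String) : String :=
  let r := (PySem.Str.splitlines md).foldl pvStepA ([], false, none, "")
  PySem.Str.strip (PySem.Str.join "\n" r.1) ++ "\n"

-- ===== PORT B =====
-- B pass 1 body: record the entry state, then update it by the fence rules
def pvStep1 (s : List (Option String) × Option String) (line : String) :
    List (Option String) × Option String :=
  let states := s.1 ++ [s.2]
  let st :=
    if PySem.Str.startswith line "```" || PySem.Str.startswith line "~~~" then
      match s.2 with
      | none => some (PySem.Str.slice line none (some 3))
      | some f => if PySem.Str.startswith line f then none else some f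
    else s.2
  (states, st)

-- B pass 2 body: t = (line, (entry state, previous line))
def pvStep2 (acc : List String) (t : String × Option String × String) : List String :=
  if t.2.1.isNone && PySem.Str.startswith t.1 "## " && (PySem.Str.strip t.2.2 != "---") then
    (acc ++ ["---"]) ++ [t.1]
  else acc ++ [t.1]

def insert_separators_py_alt (md : String) : String :=
  let lines := PySem.Str.splitlines md
  let states := (lines.foldl pvStep1 ([], none)).1
  let prevs := "" :: PySem.List.slice lines none (some (-1))
  let pieces := (lines.zip (states.zip prevs)).foldl pvStep2 []
  PySem.Str.strip (PySem.Str.join "\n" pieces) ++ "\n"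

-- ===== PRECONDITION & SPEC =====
def Spec_insert_separators_py (md : String) (out : String) : Prop := out = insert_separators_py_alt md
instance (md : String) (out : String) : Decidable (Spec_insert_separators_py md out) := by unfold Spec_insert_separators_py; infer_instance

-- ===== CLAIM (what is proved, stated in full; the proofs are below) =====
def Claim_equal_insert_separators_py : Prop := ∀ (md : String), Dom_insert_separators_py md → Spec_insert_separators_py md (insert_separators_py md)

-- ===== LEMMAS AND PROOFS =====

def pvFence (l : String) : Bool :=
  PySem.Str.startswith l "```" || PySem.Str.startswith l "~~~"

def pvUpd (st : Option String) (l : String) : Option String :=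
  if pvFence l then
    match st with
    | none => some (PySem.Str.slice l none (some 3))
    | some f => if PySem.Str.startswith l f then none else some f
  else st

-- reachable fence states: none, or a nonempty fence string
def pvGood (st : Option String) : Prop :=
  ∀ f, st = some f → f.toList ≠ []

def pvStates : Option String → List String → List (Option String)
  | _, [] => []
  | st, l :: ls => st :: pvStates (pvUpd st l) ls

def pvHead (st : Option String) (prev l : String) : List String :=
  if pvFence l then [l]
  else if st.isNone && PySem.Str.startswith l "## " && (PySem.Str.strip prev != "---") then ["---", l]
  else [l]

def pvEmit : Option String → String → List String → List String
  | _, _, [] => []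
  | st, prev, l :: ls => pvHead st prev l ++ pvEmit (pvUpd st l) l ls

lemma pvFence_slice_ne (l : String) (h : pvFence l = true) :
    (PySem.Str.slice l none (some 3)).toList ≠ [] := by
  have h3 : 3 ≤ l.toList.length := by
    simp [pvFence, PySem.Str.startswith_eq, PySem.Chars.startswith_iff] at h
    rcases h with h | h <;> simpa using h.length_le
  rw [PySem.Str.toList_slice, PySem.Chars.slice_eq_listSlice,
    PySem.List.slice_to (b := 3) (xs := l.toList) (by norm_num)]
  simp only [ne_eq, List.take_eq_nil_iff]
  push Not
  constructor
  · omega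
  · intro hl; rw [hl] at h3; simp at h3

lemma pvFence_not_heading (l : String) (h : pvFence l = true) :
    PySem.Str.startswith l "## " = false := by
  simp only [pvFence, Bool.or_eq_true, PySem.Str.startswith_eq, PySem.Chars.startswith_iff] at h
  by_contra hc
  simp only [Bool.not_eq_false, PySem.Str.startswith_eq, PySem.Chars.startswith_iff] at hc
  obtain ⟨t, ht⟩ := hc
  rcases h with ⟨u, hu⟩ | ⟨u, hu⟩ <;>
    · rw [← ht] at hu
      simp at hu

lemma pvGood_upd (st : Option String) (l : String) (h : pvGood st) : pvGood (pvUpd st l) := by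
  intro f hf
  unfold pvUpd at hf
  by_cases hfl : pvFence l = true
  · rw [if_pos hfl] at hf
    cases st with
    | none =>
        simp only [Option.some.injEq] at hf
        subst hf; exact pvFence_slice_ne l hfl
    | some g =>
        have hf' : (if PySem.Str.startswith l g = true then (none : Option String) else some g) =
            some f := hf
        by_cases hs : PySem.Str.startswith l g = true
        · rw [if_pos hs] at hf'; cases hf'
        · rw [if_neg hs] at hf'
          injection hf' with hgf
          exact hgf ▸ h g rfl
  · rw [if_neg hfl] at hf
    exact h f hf

lemma pvStepA_eq (out : List String) (st : Option String) (prev l : String) (h : pvGood st) :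
    pvStepA (out, st.isSome, st, prev) l =
      (out ++ pvHead st prev l, (pvUpd st l).isSome, pvUpd st l, l) := by
  unfold pvStepA pvUpd pvHead pvNeedSep
  by_cases hfl : pvFence l = true
  · have hc : (PySem.Str.startswith l "```" || PySem.Str.startswith l "~~~") = true := hfl
    simp only [pvFence, hc, if_true]
    cases st with
    | none => simp only [Option.isSome_none, Bool.not_false, if_true, Option.isSome_some]
    | some f =>
        have hne : (f != "") = true := by
          have hf := h f rfl
          simp only [bne_iff_ne, ne_eq]
          intro he; apply hf; rw [he]; rfl
        simp only [Option.isSome_some, Bool.not_true, Bool.false_eq_true, if_false, hne,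
          Bool.true_and]
        by_cases hs : PySem.Str.startswith l f = true <;>
          simp only [hs, if_true, Bool.false_eq_true, if_false, Option.isSome_none,
            Option.isSome_some]
  · have hc : (PySem.Str.startswith l "```" || PySem.Str.startswith l "~~~") = false := by
      simpa only [pvFence, Bool.not_eq_true] using hfl
    simp only [pvFence, hc, Bool.false_eq_true, if_false]
    cases st with
    | none =>
        simp only [Option.isSome_none, Bool.not_false, Bool.true_and, Option.isNone_none,
          Bool.true_and]
        by_cases hh : PySem.Str.startswith l "## " = true <;>
          by_cases hn : (PySem.Str.strip prev != "---") = true <;>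
            simp only [hh, hn, if_true, Bool.false_eq_true, if_false, Bool.and_true,
              Bool.and_false, List.append_assoc, List.cons_append, List.nil_append]
    | some f =>
        simp only [Option.isSome_some, Bool.not_true, Bool.false_and, Bool.false_eq_true,
          if_false, Option.isNone_some]

lemma aFold_eq (ls : List String) : ∀ (out : List String) (st : Option String) (prev : String),
    pvGood st → (ls.foldl pvStepA (out, st.isSome, st, prev)).1 = out ++ pvEmit st prev ls := by
  induction ls with
  | nil => intro out st prev _; simp [pvEmit]
  | cons l ls ih =>
      intro out st prev h
      rw [List.foldl_cons, pvStepA_eq out st prev l h, ih _ _ _ (pvGood_upd st l h)]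
      simp [pvEmit]

lemma bPass1_eq (ls : List String) : ∀ (acc : List (Option String)) (st : Option String),
    (ls.foldl pvStep1 (acc, st)).1 = acc ++ pvStates st ls := by
  induction ls with
  | nil => intro acc st; simp [pvStates]
  | cons l ls ih =>
      intro acc st
      have hstep : pvStep1 (acc, st) l = (acc ++ [st], pvUpd st l) := by
        simp [pvStep1, pvUpd, pvFence]
      rw [List.foldl_cons, hstep, ih]
      simp [pvStates]

lemma pvStep2_eq (acc : List String) (st : Option String) (prev l : String) (h : pvGood st) :
    pvStep2 acc (l, st, prev) = acc ++ pvHead st prev l := by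
  unfold pvStep2 pvHead
  by_cases hfl : pvFence l = true
  · simp only [hfl, if_true, pvFence_not_heading l hfl, Bool.and_false, Bool.false_and,
      Bool.false_eq_true, if_false]
  · simp only [hfl, Bool.false_eq_true, if_false]
    cases st with
    | none =>
        simp only [Option.isNone_none, Bool.true_and]
        by_cases hh : PySem.Str.startswith l "## " = true <;>
          by_cases hn : (PySem.Str.strip prev != "---") = true <;>
            simp only [hh, hn, Bool.and_true, Bool.and_false, Bool.true_and, if_true,
              Bool.false_eq_true, Bool.false_and, if_false, List.append_assoc,
              List.cons_append, List.nil_append]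
    | some f => simp only [Option.isNone_some, Bool.false_and, Bool.false_eq_true, if_false]

lemma bPass2_eq (ls : List String) : ∀ (st : Option String) (prev : String) (acc : List String),
    pvGood st →
    ((ls.zip ((pvStates st ls).zip (prev :: ls.dropLast))).foldl pvStep2 acc) = acc ++ pvEmit st prev ls := by
  induction ls with
  | nil => intro st prev acc _; simp [pvStates, pvEmit]
  | cons l ls ih =>
      intro st prev acc h
      cases ls with
      | nil =>
          have hd : ([l] : List String).dropLast = [] := rfl
          rw [hd]
          rw [show pvStates st [l] = [st] from rfl]
          simp only [List.zip_cons_cons, List.zip_nil_right,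
            List.foldl_cons, List.foldl_nil]
          rw [pvStep2_eq acc st prev l h]
          simp [pvEmit]
      | cons x xs =>
          rw [List.dropLast_cons₂]
          rw [show pvStates st (l :: x :: xs) = st :: pvStates (pvUpd st l) (x :: xs) from rfl]
          rw [List.zip_cons_cons, List.zip_cons_cons, List.foldl_cons]
          rw [pvStep2_eq acc st prev l h, ih _ _ _ (pvGood_upd st l h)]
          simp [pvEmit]

-- ===== VERDICT (by name: the statement is the Claim_ definition above) =====
theorem insert_separators_py_spec : Claim_equal_insert_separators_py := by
  intro md _
  unfold Spec_insert_separators_py insert_separators_py insert_separators_py_alt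
  have hgood : pvGood none := by intro f hf; cases hf
  have hA := aFold_eq (PySem.Str.splitlines md) [] none "" hgood
  have hB1 := bPass1_eq (PySem.Str.splitlines md) [] none
  have hB2 := bPass2_eq (PySem.Str.splitlines md) none "" [] hgood
  simp only [Option.isSome_none] at hA
  simp only [hA, hB1, PySem.List.slice_to_neg_one, List.nil_append]
  rw [hB2]
  simp
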